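-- pv_equiv track=rewrite | github.com/KingpinDk/NPTEL-PYTHON-ASSESSMENT-ANSWERS | Week 8: Programming Assignment 2.py | replaceV
-- ===== SOURCE A (Python) =====
-- def isVowel(c):
--   c = c.lower()
--   if(c == 'a' or c== 'e' or c == 'i' or c == 'o' or c == 'u'):
--   	return True;
--   else:
--   	return False;
--
-- def replaceV(S):
--   L = list(S)
--   for i in range(0,len(S)-2):
--     if(isVowel(L[i]) and isVowel(L[i+1]) and isVowel(L[i+2])):
--       L[i] = '#'
--       L[i+1] = '#'
--       L[i+2] = '#'
--       i+=2
--   return ("".join(L).replace("###","_"))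
-- ===== SOURCE B (Python) =====
-- def replaceV(S):
--     out = []
--     run = 0
--     for c in S:
--         out.append(c)
--         if c.lower() in 'aeiou':
--             run += 1
--             if run == 3:
--                 out[-3:] = '###'
--                 run = 0
--         else:
--             run = 0
--     return ''.join(out).replace('###', '_')
-- ===== Notes on version B (the rewrite author's own statement) =====
-- stated objective: alternative
-- what changed: Replaces A's index-based three-cell sliding window over a mutable list with a single streaming pass that keeps a consecutive-vowel counter and rewrites the last three emitted characters each time the counter reaches 3, followed by the same single global replacement.
import Mathlib
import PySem

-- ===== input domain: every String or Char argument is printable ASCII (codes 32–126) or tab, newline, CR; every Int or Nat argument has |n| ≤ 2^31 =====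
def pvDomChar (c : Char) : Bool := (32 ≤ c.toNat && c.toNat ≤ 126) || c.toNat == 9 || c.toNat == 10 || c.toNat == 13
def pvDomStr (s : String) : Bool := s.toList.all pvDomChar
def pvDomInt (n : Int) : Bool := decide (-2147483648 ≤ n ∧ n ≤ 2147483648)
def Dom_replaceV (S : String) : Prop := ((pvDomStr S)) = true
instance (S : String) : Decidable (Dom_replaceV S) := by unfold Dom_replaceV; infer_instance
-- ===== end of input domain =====

-- B rewrites A's index-based three-cell sliding window (in-place list mutation) as a single
-- streaming pass with a consecutive-vowel counter; same return value, no speed claim.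

-- ===== PORT A =====
-- isVowel(c): c.lower() == one of 'aeiou'.  (Char-wise .lower(); PySem.Chars.lowerChar is exact on ASCII.)
def pvIsVowelA (c : Char) : Bool :=
  let c := PySem.Chars.lowerChar c
  c == 'a' || c == 'e' || c == 'i' || c == 'o' || c == 'u'

-- the body of A's 'for i in range(0, len(S)-2)' loop (indices are always in range; the
-- trailing 'i += 2' in the Python is dead, since 'range' reassigns i each iteration)
def pvStepA (L : List Char) (i : Int) : List Char :=
  if pvIsVowelA (PySem.List.pyGetD L i ' ') && pvIsVowelA (PySem.List.pyGetD L (i+1) ' ')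
      && pvIsVowelA (PySem.List.pyGetD L (i+2) ' ') then
    PySem.List.pySetD (PySem.List.pySetD (PySem.List.pySetD L i '#') (i+1) '#') (i+2) '#'
  else L

def replaceV (S : String) : String :=
  let L := S.toList
  let L' := (PySem.List.pyRange 0 ((PySem.Str.len S : Int) - 2) 1).foldl pvStepA L
  PySem.Str.replace (String.ofList L') "###" "_"

-- ===== PORT B =====
-- c.lower() in 'aeiou'
def pvIsVowelB (c : Char) : Bool :=
  "aeiou".toList.contains (PySem.Chars.lowerChar c)

-- one iteration of Source B's loop; state = (out, run).  'out[-3:] = "###"' replaces the last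
-- three elements (out always has ≥ 3 elements when run hits 3).
def pvStepB (st : List Char × Nat) (c : Char) : List Char × Nat :=
  let out := st.1 ++ [c]
  if pvIsVowelB c then
    let run := st.2 + 1
    if run == 3 then (out.take (out.length - 3) ++ ['#', '#', '#'], 0)
    else (out, run)
  else (out, 0)

def replaceV_alt (S : String) : String :=
  PySem.Str.replace (String.ofList (S.toList.foldl pvStepB ([], 0)).1) "###" "_"

-- ===== PRECONDITION & SPEC =====
def Spec_replaceV (S : String) (out : String) : Prop := out = replaceV_alt S
instance (S : String) (out : String) : Decidable (Spec_replaceV S out) := by unfold Spec_replaceV; infer_instance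

-- ===== CLAIM (what is proved, stated in full; the proofs are below) =====
def Claim_equal_replaceV : Prop := ∀ (S : String), Dom_replaceV S → Spec_replaceV S (replaceV S)

-- ===== LEMMAS AND PROOFS =====

-- Common characterisation of both programs' marking phase: each still-unmarked vowel triple
-- (left to right) becomes '###'; the windows following a mark see '#'s, which are not vowels.
def pvMark : List Char → List Char
  | [] => []
  | [c] => [c]
  | [c1, c2] => [c1, c2]
  | c1 :: c2 :: c3 :: rest =>
      if pvIsVowelA c1 && pvIsVowelA c2 && pvIsVowelA c3 then
        '#' :: '#' :: '#' :: pvMark rest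
      else
        c1 :: pvMark (c2 :: c3 :: rest)
termination_by l => l.length

theorem pvIsVowelB_eq (c : Char) : pvIsVowelB c = pvIsVowelA c := by
  unfold pvIsVowelB pvIsVowelA
  rw [show "aeiou".toList = ['a', 'e', 'i', 'o', 'u'] from rfl]
  simp only [List.contains_cons, List.contains_nil, Bool.or_false, Bool.beq_eq_decide_eq]
  ac_rfl

theorem pvMark_cons_nonvowel (x : Char) (l : List Char) (hx : pvIsVowelA x = false) :
    pvMark (x :: l) = x :: pvMark l := by
  match l with
  | [] => simp [pvMark]
  | [a] => simp [pvMark]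
  | a :: b :: r => simp [pvMark, hx]

theorem pvMark_short (l : List Char) (h : l.length ≤ 2) : pvMark l = l := by
  match l with
  | [] => simp [pvMark]
  | [a] => simp [pvMark]
  | [a, b] => simp [pvMark]

-- helper for pvMark_append_nonvowel only
def pvFlush (run : List Char) : List Char :=
  let k := run.length / 3
  List.replicate (3 * k) '#' ++ run.drop (3 * k)

theorem pvFlush_short (l : List Char) (h : l.length < 3) : pvFlush l = l := by
  have : l.length / 3 = 0 := by omega
  simp [pvFlush, this]

theorem pvFlush_cons3 (a b c : Char) (r : List Char) :
    pvFlush (a :: b :: c :: r) = '#' :: '#' :: '#' :: pvFlush r := by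
  simp only [pvFlush, List.length_cons]
  rw [show (r.length + 1 + 1 + 1) / 3 = r.length / 3 + 1 by omega]
  rw [show 3 * (r.length / 3 + 1) = 3 + 3 * (r.length / 3) by ring]
  rw [List.replicate_add]
  rw [show 3 + 3 * (r.length / 3) = 3 * (r.length / 3) + 1 + 1 + 1 by ring]
  simp [List.drop_succ_cons, List.replicate_succ]

theorem pvMark_run_append (run : List Char) (hr : ∀ c ∈ run, pvIsVowelA c = true)
    (c : Char) (hc : pvIsVowelA c = false) (cs : List Char) :
    pvMark (run ++ c :: cs) = pvFlush run ++ c :: pvMark cs := by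
  match run with
  | [] => simp [pvFlush, pvMark_cons_nonvowel c cs hc]
  | [v] =>
      have hv := hr v (by simp)
      rw [pvFlush_short [v] (by simp)]
      match cs with
      | [] => simp [pvMark]
      | d :: ds =>
          show pvMark (v :: c :: d :: ds) = v :: c :: pvMark (d :: ds)
          rw [show pvMark (v :: c :: d :: ds) = v :: pvMark (c :: d :: ds) by simp [pvMark, hc]]
          rw [pvMark_cons_nonvowel c (d :: ds) hc]
  | [v1, v2] =>
      have hv2 := hr v2 (by simp)
      rw [pvFlush_short [v1, v2] (by simp)]
      show pvMark (v1 :: v2 :: c :: cs) = v1 :: v2 :: c :: pvMark cs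
      rw [show pvMark (v1 :: v2 :: c :: cs) = v1 :: pvMark (v2 :: c :: cs) by simp [pvMark, hc]]
      have := pvMark_run_append [v2] (by simpa using hv2) c hc cs
      simpa [pvFlush_short [v2] (by simp)] using this
  | v1 :: v2 :: v3 :: r =>
      have h1 := hr v1 (by simp); have h2 := hr v2 (by simp); have h3 := hr v3 (by simp)
      show pvMark (v1 :: v2 :: v3 :: (r ++ c :: cs)) = _
      rw [pvFlush_cons3]
      simp only [pvMark, h1, h2, h3, Bool.and_self]
      rw [pvMark_run_append r (fun x hx => hr x (by simp [hx])) c hc cs]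
      simp
termination_by run.length

-- B's fold equals pvMark; invariant: 'out' = finished prefix ++ pending vowel run 'p', run = |p| ≤ 2
theorem pvFoldB (l : List Char) (done p : List Char)
    (hp : ∀ c ∈ p, pvIsVowelA c = true) (hlen : p.length ≤ 2) :
    (l.foldl pvStepB (done ++ p, p.length)).1 = done ++ pvMark (p ++ l) := by
  induction l generalizing done p with
  | nil => simp [pvMark_short p (by omega)]
  | cons c cs ih =>
      by_cases hv : pvIsVowelA c = true
      · by_cases h2 : p.length = 2
        · obtain ⟨v1, v2, rfl⟩ : ∃ v1 v2, p = [v1, v2] := by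
            match p, h2 with | [v1, v2], _ => exact ⟨v1, v2, rfl⟩
          have hstep : pvStepB (done ++ [v1, v2], 2) c = (done ++ ['#', '#', '#'], 0) := by
            simp only [pvStepB, pvIsVowelB_eq, hv, if_pos]
            simp
          rw [List.foldl_cons, show ([v1, v2] : List Char).length = 2 from rfl, hstep]
          have := ih (done ++ ['#', '#', '#']) [] (by simp) (by simp)
          simp only [List.append_nil, List.nil_append, List.length_nil] at this
          rw [this]
          have h1 := hp v1 (by simp); have h2' := hp v2 (by simp)
          simp [pvMark, h1, h2', hv]
        · have hstep : pvStepB (done ++ p, p.length) c = (done ++ (p ++ [c]), p.length + 1) := by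
            simp only [pvStepB, pvIsVowelB_eq, hv, if_pos]
            rw [if_neg (by simp; omega)]
            simp
          rw [List.foldl_cons, hstep]
          have := ih done (p ++ [c])
            (by intro x hx; rcases List.mem_append.1 hx with h | h
                · exact hp x h
                · simp at h; simpa [h] using hv)
            (by simp; omega)
          simpa using this
      · have hv' : pvIsVowelA c = false := by simpa using hv
        have hstep : pvStepB (done ++ p, p.length) c = (done ++ p ++ [c], 0) := by
          simp [pvStepB, pvIsVowelB_eq, hv']
        rw [List.foldl_cons, hstep]
        have := ih (done ++ p ++ [c]) [] (by simp) (by simp)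
        simp only [List.append_nil, List.length_nil] at this
        rw [this]
        rw [pvMark_run_append p hp c hv' cs, pvFlush_short p (by omega)]
        simp

-- indexing/assignment into pre ++ suf at offset pre.length + k
theorem pvGetD_append (pre l : List Char) (k : Nat) (d : Char) :
    PySem.List.pyGetD (pre ++ l) ((pre.length : Int) + k) d = l.getD k d := by
  have h : ((pre.length : Int) + k) = (((pre.length + k : Nat)) : Int) := by push_cast; ring
  rw [h, PySem.List.pyGetD_natCast]
  simp [List.getD, List.getElem?_append_right]

theorem pvSetD_append (pre l : List Char) (k : Nat) (v : Char) :
    PySem.List.pySetD (pre ++ l) ((pre.length : Int) + k) v = pre ++ l.set k v := by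
  have h : ((pre.length : Int) + k) = (((pre.length + k : Nat)) : Int) := by push_cast; ring
  rw [h, PySem.List.pySetD_natCast]
  simp

-- A's loop, started at index pre.length on pre ++ suf, leaves pre alone and marks suf
theorem pvLoopA (suf pre : List Char) :
    (PySem.List.pyRange (pre.length : Int) ((pre.length : Int) + suf.length - 2) 1).foldl
      pvStepA (pre ++ suf) = pre ++ pvMark suf := by
  match suf with
  | [] => rw [PySem.List.pyRange_one_eq_nil (by simp)]; simp [pvMark]
  | [c] => rw [PySem.List.pyRange_one_eq_nil (by simp)]; simp [pvMark]
  | [c, c'] => rw [PySem.List.pyRange_one_eq_nil (by simp)]; simp [pvMark]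
  | c1 :: c2 :: c3 :: rest =>
      have hb : (pre.length : Int) < (pre.length : Int) + (c1 :: c2 :: c3 :: rest).length - 2 := by
        simp; omega
      rw [PySem.List.pyRange_one_cons hb, List.foldl_cons]
      have g1 : PySem.List.pyGetD (pre ++ c1 :: c2 :: c3 :: rest) (pre.length : Int) ' ' = c1 := by
        simpa using pvGetD_append pre (c1 :: c2 :: c3 :: rest) 0 ' '
      have g2 : PySem.List.pyGetD (pre ++ c1 :: c2 :: c3 :: rest) ((pre.length : Int) + 1) ' ' = c2 := by
        simpa using pvGetD_append pre (c1 :: c2 :: c3 :: rest) 1 ' '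
      have g3 : PySem.List.pyGetD (pre ++ c1 :: c2 :: c3 :: rest) ((pre.length : Int) + 2) ' ' = c3 := by
        simpa using pvGetD_append pre (c1 :: c2 :: c3 :: rest) 2 ' '
      by_cases hv : (pvIsVowelA c1 && pvIsVowelA c2 && pvIsVowelA c3) = true
      · have hstep : pvStepA (pre ++ c1 :: c2 :: c3 :: rest) (pre.length : Int)
            = (pre ++ ['#']) ++ '#' :: '#' :: rest := by
          rw [pvStepA, g1, g2, g3, if_pos hv]
          rw [show PySem.List.pySetD (pre ++ c1 :: c2 :: c3 :: rest) (pre.length : Int) '#'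
                = pre ++ '#' :: c2 :: c3 :: rest by
              simpa using pvSetD_append pre (c1 :: c2 :: c3 :: rest) 0 '#']
          rw [show PySem.List.pySetD (pre ++ '#' :: c2 :: c3 :: rest) ((pre.length : Int) + 1) '#'
                = pre ++ '#' :: '#' :: c3 :: rest by
              simpa using pvSetD_append pre ('#' :: c2 :: c3 :: rest) 1 '#']
          rw [show PySem.List.pySetD (pre ++ '#' :: '#' :: c3 :: rest) ((pre.length : Int) + 2) '#'
                = pre ++ '#' :: '#' :: '#' :: rest by
              simpa using pvSetD_append pre ('#' :: '#' :: c3 :: rest) 2 '#']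
          simp
        rw [hstep]
        have hrec := pvLoopA ('#' :: '#' :: rest) (pre ++ ['#'])
        rw [show (((pre ++ ['#']).length : Int)) = (pre.length : Int) + 1 by simp] at hrec
        rw [show ((pre.length : Int) + 1 + (('#' :: '#' :: rest).length : Int) - 2)
              = ((pre.length : Int) + ((c1 :: c2 :: c3 :: rest).length : Int) - 2) by simp; ring] at hrec
        rw [hrec]
        rw [pvMark_cons_nonvowel '#' _ (by decide), pvMark_cons_nonvowel '#' _ (by decide)]
        obtain ⟨⟨h1, h2⟩, h3⟩ : (pvIsVowelA c1 = true ∧ pvIsVowelA c2 = true) ∧ pvIsVowelA c3 = true := by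
          simpa using hv
        simp [pvMark, h1, h2, h3]
      · have hstep : pvStepA (pre ++ c1 :: c2 :: c3 :: rest) (pre.length : Int)
            = (pre ++ [c1]) ++ c2 :: c3 :: rest := by
          rw [pvStepA, g1, g2, g3, if_neg hv]
          simp
        rw [hstep]
        have hrec := pvLoopA (c2 :: c3 :: rest) (pre ++ [c1])
        rw [show (((pre ++ [c1]).length : Int)) = (pre.length : Int) + 1 by simp] at hrec
        rw [show ((pre.length : Int) + 1 + ((c2 :: c3 :: rest).length : Int) - 2)
              = ((pre.length : Int) + ((c1 :: c2 :: c3 :: rest).length : Int) - 2) by simp; ring] at hrec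
        rw [hrec]
        have hv' : (pvIsVowelA c1 && pvIsVowelA c2 && pvIsVowelA c3) = false := by simpa using hv
        simp [pvMark, hv']
termination_by suf.length

-- ===== VERDICT (by name: the statement is the Claim_ definition above) =====
theorem replaceV_spec : Claim_equal_replaceV := by
  intro S _
  have hA := pvLoopA S.toList []
  simp only [List.length_nil, Nat.cast_zero, zero_add, List.nil_append] at hA
  have hB := pvFoldB S.toList [] [] (by simp) (by simp)
  simp only [List.append_nil, List.nil_append, List.length_nil] at hB
  unfold Spec_replaceV replaceV replaceV_alt
  show PySem.Str.replace
        (String.ofList ((PySem.List.pyRange 0 ((PySem.Str.len S : Int) - 2) 1).foldl pvStepA S.toList))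
        "###" "_"
      = PySem.Str.replace (String.ofList (S.toList.foldl pvStepB ([], 0)).1) "###" "_"
  rw [show ((PySem.Str.len S : Int) - 2) = ((S.toList.length : Int) - 2) by simp [PySem.Str.len_eq]]
  rw [hA, hB]
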